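-- pv_equiv track=rewrite | github.com/erennere/plant_capacity | research_code/pop_at_risk_river_calculations/find_intersection_river.py | find_intersection_id
-- ===== SOURCE A (Python) =====
-- def find_intersection_id(id1, id2, graph):
--     """Find first common downstream node between two river IDs."""
--     visited = set()
--     while id1:
--         visited.add(id1)
--         id1 = graph.get(id1)
--     while id2:
--         if id2 in visited:
--             return id2
--         id2 = graph.get(id2)
--     return None
-- ===== SOURCE B (Python) =====
-- def find_intersection_id(id1, id2, graph):
--     """Find first common downstream node between two river IDs.
--
--     Two-pointer chain intersection in O(1) extra space: measure both chains,
--     advance the longer one by the length difference, then walk in lockstep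
--     until the pointers coincide; the meeting node is the first common node."""
--     def chain_length(x):
--         n = 0
--         while x:
--             n += 1
--             x = graph.get(x)
--         return n
--     n1 = chain_length(id1)
--     n2 = chain_length(id2)
--     for _ in range(n1 - n2):
--         id1 = graph.get(id1)
--     for _ in range(n2 - n1):
--         id2 = graph.get(id2)
--     for _ in range(min(n1, n2)):
--         if id1 == id2:
--             return id1
--         id1 = graph.get(id1)
--         id2 = graph.get(id2)
--     return None
-- ===== Notes on version B (the rewrite author's own statement) =====
-- stated objective: alternative
-- what changed: Replaces the visited-set membership scan with the classic two-pointer linked-list intersection: measure both chains, advance the longer by the difference, then walk both in lockstep until the pointers meet, using O(1) extra space instead of a set of all upstream nodes.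
import Mathlib
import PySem

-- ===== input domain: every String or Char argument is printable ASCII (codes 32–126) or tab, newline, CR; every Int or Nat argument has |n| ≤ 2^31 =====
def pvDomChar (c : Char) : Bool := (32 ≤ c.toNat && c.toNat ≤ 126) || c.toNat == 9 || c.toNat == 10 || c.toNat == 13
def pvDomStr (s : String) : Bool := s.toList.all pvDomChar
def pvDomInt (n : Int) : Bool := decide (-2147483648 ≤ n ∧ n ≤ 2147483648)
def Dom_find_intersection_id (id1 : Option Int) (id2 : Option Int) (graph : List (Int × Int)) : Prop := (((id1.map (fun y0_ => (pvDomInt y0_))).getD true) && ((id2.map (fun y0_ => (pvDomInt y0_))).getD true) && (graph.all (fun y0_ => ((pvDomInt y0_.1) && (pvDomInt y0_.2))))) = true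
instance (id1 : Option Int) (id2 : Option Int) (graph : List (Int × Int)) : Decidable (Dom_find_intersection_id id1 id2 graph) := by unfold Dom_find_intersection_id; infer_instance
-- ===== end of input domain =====

-- B replaces A's visited-set scan by the two-pointer linked-list intersection (align by chain length, then
-- walk in lockstep until the pointers meet) — an alternative algorithm using O(1) extra space.

-- ===== PORT A =====
-- Python truthiness of an Optional[int]: None and 0 are falsy.
def pvTruthy : Option Int → Bool
  | none => false
  | some n => n != 0

-- graph.get(x): dict lookup, None if missing; graph.get(None) is None (int keys never equal None).
def pvGet (graph : List (Int × Int)) (x : Option Int) : Option Int :=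
  match x with
  | none => none
  | some n => PySem.Dict.get? ⟨graph⟩ n

-- 'while id1: visited.add(id1); id1 = graph.get(id1)' (fuel: under Pre_ the chain stops within length+1 steps)
def fiLoop1 (graph : List (Int × Int)) : Nat → Option Int → PySem.Set Int → PySem.Set Int
  | 0, _, visited => visited
  | fuel+1, id1, visited =>
    match id1 with
    | some n => if n != 0 then fiLoop1 graph fuel (pvGet graph (some n)) (visited.add n) else visited
    | none => visited

-- 'while id2: if id2 in visited: return id2; id2 = graph.get(id2)'; 'return None'
def fiLoop2 (graph : List (Int × Int)) : Nat → Option Int → PySem.Set Int → Option Int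
  | 0, _, _ => none
  | fuel+1, id2, visited =>
    match id2 with
    | some n => if n != 0 then (if n ∈ visited then some n else fiLoop2 graph fuel (pvGet graph (some n)) visited) else none
    | none => none

def find_intersection_id (id1 : Option Int) (id2 : Option Int) (graph : List (Int × Int)) : Option Int :=
  fiLoop2 graph (graph.length + 1) id2 (fiLoop1 graph (graph.length + 1) id1 PySem.Set.empty)

-- ===== PORT B =====
-- 'def chain_length(x): n = 0; while x: n += 1; x = graph.get(x); return n'
def pvChainLen (graph : List (Int × Int)) : Nat → Option Int → Nat
  | 0, _ => 0
  | fuel+1, x =>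
    match x with
    | some n => if n != 0 then pvChainLen graph fuel (pvGet graph (some n)) + 1 else 0
    | none => 0

-- 'for _ in range(k): x = graph.get(x)'
def pvAdvance (graph : List (Int × Int)) : Nat → Option Int → Option Int
  | 0, x => x
  | k+1, x => pvAdvance graph k (pvGet graph x)

-- 'for _ in range(p): if id1 == id2: return id1; step both'; 'return None'
def pvMeet (graph : List (Int × Int)) : Nat → Option Int → Option Int → Option Int
  | 0, _, _ => none
  | k+1, x, y => if x = y then x else pvMeet graph k (pvGet graph x) (pvGet graph y)

def find_intersection_id_alt (id1 : Option Int) (id2 : Option Int) (graph : List (Int × Int)) : Option Int :=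
  let n1 := pvChainLen graph (graph.length + 1) id1
  let n2 := pvChainLen graph (graph.length + 1) id2
  pvMeet graph (min n1 n2) (pvAdvance graph (n1 - n2) id1) (pvAdvance graph (n2 - n1) id2)

-- ===== PRECONDITION & SPEC =====
-- the mathematical chain: k-fold application of graph.get
def chIt (graph : List (Int × Int)) (x : Option Int) (k : Nat) : Option Int := (pvGet graph)^[k] x

-- A loops forever when the successor chain from id1 or id2 runs into a cycle; Pre_ states that each
-- downstream walk reaches a falsy node (None or 0). The step bound graph.length + 2 loses nothing: a
-- terminating walk never repeats a node and every non-final node is a key of graph, so by pigeonhole it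
-- stops within graph.length + 1 applications of graph.get.
def Pre_find_intersection_id (id1 : Option Int) (id2 : Option Int) (graph : List (Int × Int)) : Prop :=
  (∃ m, m < graph.length + 2 ∧ pvTruthy (chIt graph id1 m) = false) ∧
  (∃ m, m < graph.length + 2 ∧ pvTruthy (chIt graph id2 m) = false)
instance (id1 : Option Int) (id2 : Option Int) (graph : List (Int × Int)) : Decidable (Pre_find_intersection_id id1 id2 graph) := by unfold Pre_find_intersection_id; infer_instance

def pvWitness_find_intersection_id : Option Int × Option Int × (List (Int × Int)) :=
  (some 1, some 2, [(1, 3), (2, 3)])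

def Spec_find_intersection_id (id1 : Option Int) (id2 : Option Int) (graph : List (Int × Int)) (out : Option Int) : Prop := out = find_intersection_id_alt id1 id2 graph
instance (id1 : Option Int) (id2 : Option Int) (graph : List (Int × Int)) (out : Option Int) : Decidable (Spec_find_intersection_id id1 id2 graph out) := by unfold Spec_find_intersection_id; infer_instance

-- ===== CLAIM (what is proved, stated in full; the proofs are below) =====
def Claim_equal_find_intersection_id : Prop := ∀ (id1 : Option Int) (id2 : Option Int) (graph : List (Int × Int)), Dom_find_intersection_id id1 id2 graph → Pre_find_intersection_id id1 id2 graph → Spec_find_intersection_id id1 id2 graph (find_intersection_id id1 id2 graph)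

-- ===== LEMMAS AND PROOFS =====

-- the walk from x stops exactly at step m
def StopAt (graph : List (Int × Int)) (x : Option Int) (m : Nat) : Prop :=
  (∀ j < m, pvTruthy (chIt graph x j) = true) ∧ pvTruthy (chIt graph x m) = false

theorem chIt_zero (g : List (Int × Int)) (x : Option Int) : chIt g x 0 = x := rfl

theorem chIt_succ (g : List (Int × Int)) (x : Option Int) (k : Nat) :
    chIt g x (k + 1) = chIt g (pvGet g x) k := by
  simp [chIt, Function.iterate_succ_apply]

theorem chIt_add (g : List (Int × Int)) (x : Option Int) (a b : Nat) :
    chIt g x (a + b) = chIt g (chIt g x b) a := by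
  simp [chIt, Function.iterate_add_apply]

theorem truthy_some (z : Option Int) (h : pvTruthy z = true) : ∃ n, z = some n ∧ n ≠ 0 := by
  cases z with
  | none => simp [pvTruthy] at h
  | some n => exact ⟨n, rfl, by simpa [pvTruthy, bne_iff_ne] using h⟩

theorem stopAt_succ_iff (g : List (Int × Int)) (x : Option Int) (m : Nat) :
    StopAt g x (m + 1) ↔ pvTruthy x = true ∧ StopAt g (pvGet g x) m := by
  constructor
  · rintro ⟨ht, hf⟩
    refine ⟨by simpa [chIt_zero] using ht 0 (Nat.succ_pos m), ?_, ?_⟩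
    · intro j hj
      have := ht (j + 1) (by omega)
      simpa [chIt_succ] using this
    · simpa [chIt_succ] using hf
  · rintro ⟨hx, ht, hf⟩
    refine ⟨?_, by simpa [chIt_succ] using hf⟩
    intro j hj
    cases j with
    | zero => simpa [chIt_zero] using hx
    | succ j' => simpa [chIt_succ] using ht j' (by omega)

theorem stops_exists (g : List (Int × Int)) (f : Nat) (x : Option Int)
    (h : ∃ m, m < f + 1 ∧ pvTruthy (chIt g x m) = false) : ∃ m, m ≤ f ∧ StopAt g x m := by
  classical
  obtain ⟨mw, hmw, hfw⟩ := h
  have hex : ∃ m, pvTruthy (chIt g x m) = false := ⟨mw, hfw⟩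
  refine ⟨Nat.find hex, by have := Nat.find_min' hex hfw; omega, ?_, Nat.find_spec hex⟩
  intro j hj
  have hne := Nat.find_min hex hj
  cases hb : pvTruthy (chIt g x j) with
  | false => exact absurd hb hne
  | true => rfl

theorem chainLen_eq (g : List (Int × Int)) (f m : Nat) (x : Option Int)
    (h : StopAt g x m) (hf : m ≤ f) : pvChainLen g f x = m := by
  induction f generalizing x m with
  | zero =>
    interval_cases m
    rfl
  | succ f ih =>
    cases m with
    | zero =>
      have h2 := h.2
      cases x with
      | none => simp [pvChainLen]
      | some n =>
        simp only [chIt_zero, pvTruthy] at h2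
        simp [pvChainLen, h2]
    | succ m' =>
      obtain ⟨hx, hs⟩ := (stopAt_succ_iff g x m').mp h
      obtain ⟨n, rfl, hn⟩ := truthy_some x hx
      have : (n != 0) = true := by simpa [bne_iff_ne]
      simp [pvChainLen, this, ih m' (pvGet g (some n)) hs (by omega)]

theorem advance_eq (g : List (Int × Int)) (k : Nat) (x : Option Int) :
    pvAdvance g k x = chIt g x k := by
  induction k generalizing x with
  | zero => rfl
  | succ k ih => rw [pvAdvance, ih, ← chIt_succ]

theorem loop1_mem (g : List (Int × Int)) (f : Nat) :
    ∀ (x : Option Int) (m : Nat), StopAt g x m → m ≤ f →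
    ∀ (v : PySem.Set Int) (n : Int),
      n ∈ fiLoop1 g f x v ↔ n ∈ v ∨ ∃ j, j < m ∧ chIt g x j = some n := by
  induction f with
  | zero =>
    intro x m h hm v n
    interval_cases m
    simp [fiLoop1]
  | succ f ih =>
    intro x m h hm v n
    cases m with
    | zero =>
      have h2 := h.2
      cases x with
      | none => simp [fiLoop1]
      | some k =>
        simp only [chIt_zero, pvTruthy] at h2
        simp [fiLoop1, h2]
    | succ m' =>
      obtain ⟨hx, hs⟩ := (stopAt_succ_iff g x m').mp h
      obtain ⟨k, rfl, hk⟩ := truthy_some x hx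
      have hbne : (k != 0) = true := by simpa [bne_iff_ne]
      rw [fiLoop1]
      simp only [hbne, if_true]
      rw [ih (pvGet g (some k)) m' hs (by omega) (v.add k) n]
      rw [PySem.Set.mem_add]
      constructor
      · rintro ((hv | rfl) | ⟨j, hj, hc⟩)
        · exact Or.inl hv
        · exact Or.inr ⟨0, by omega, rfl⟩
        · exact Or.inr ⟨j + 1, by omega, by rwa [chIt_succ]⟩
      · rintro (hv | ⟨j, hj, hc⟩)
        · exact Or.inl (Or.inl hv)
        · cases j with
          | zero =>
            rw [chIt_zero] at hc
            exact Or.inl (Or.inr (by injection hc with h; exact h.symm))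
          | succ j' =>
            rw [chIt_succ] at hc
            exact Or.inr ⟨j', by omega, hc⟩

theorem loop2_none (g : List (Int × Int)) (f : Nat) :
    ∀ (y : Option Int) (m : Nat) (V : PySem.Set Int), StopAt g y m → m ≤ f →
    (∀ i < m, ∀ n, chIt g y i = some n → n ∉ V) → fiLoop2 g f y V = none := by
  induction f with
  | zero => intro y m V h hm hno; rfl
  | succ f ih =>
    intro y m V h hm hno
    cases m with
    | zero =>
      have h2 := h.2
      cases y with
      | none => rfl
      | some k =>
        simp only [chIt_zero, pvTruthy] at h2
        simp [fiLoop2, h2]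
    | succ m' =>
      obtain ⟨hy, hs⟩ := (stopAt_succ_iff g y m').mp h
      obtain ⟨k, rfl, hk⟩ := truthy_some y hy
      have hbne : (k != 0) = true := by simpa [bne_iff_ne]
      have hkV : k ∉ V := hno 0 (by omega) k rfl
      rw [fiLoop2]
      simp only [hbne, if_true, if_neg hkV]
      exact ih (pvGet g (some k)) m' V hs (by omega) (fun i hi n hc => hno (i + 1) (by omega) n (by rwa [chIt_succ]))

theorem loop2_found (g : List (Int × Int)) (f : Nat) :
    ∀ (y : Option Int) (m i0 : Nat) (V : PySem.Set Int) (n0 : Int), StopAt g y m → m ≤ f →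
    i0 < m → chIt g y i0 = some n0 → n0 ∈ V →
    (∀ i < i0, ∀ n, chIt g y i = some n → n ∉ V) → fiLoop2 g f y V = some n0 := by
  induction f with
  | zero => intro y m i0 V n0 h hm hi0 hc hV hmin; omega
  | succ f ih =>
    intro y m i0 V n0 h hm hi0 hc hV hmin
    have hm0 : 0 < m := by omega
    cases m with
    | zero => omega
    | succ m' =>
      obtain ⟨hy, hs⟩ := (stopAt_succ_iff g y m').mp h
      obtain ⟨k, rfl, hk⟩ := truthy_some y hy
      have hbne : (k != 0) = true := by simpa [bne_iff_ne]
      cases i0 with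
      | zero =>
        rw [chIt_zero] at hc
        injection hc with hc
        subst hc
        rw [fiLoop2]
        simp [hbne, hV]
      | succ i0' =>
        have hkV : k ∉ V := hmin 0 (by omega) k rfl
        rw [fiLoop2]
        simp only [hbne, if_true, if_neg hkV]
        exact ih (pvGet g (some k)) m' i0' V n0 hs (by omega) (by omega)
          (by rwa [chIt_succ] at hc) hV
          (fun i hi n hcc => hmin (i + 1) (by omega) n (by rwa [chIt_succ]))

theorem meet_none (g : List (Int × Int)) (p : Nat) :
    ∀ (x y : Option Int), (∀ r < p, chIt g x r ≠ chIt g y r) → pvMeet g p x y = none := by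
  induction p with
  | zero => intro x y hne; rfl
  | succ p ih =>
    intro x y hne
    have h0 : x ≠ y := by
      have := hne 0 (by omega)
      simpa [chIt_zero] using this
    rw [pvMeet, if_neg h0]
    exact ih (pvGet g x) (pvGet g y) (fun r hr => by
      have := hne (r + 1) (by omega)
      simpa [chIt_succ] using this)

theorem meet_found (g : List (Int × Int)) (p : Nat) :
    ∀ (x y : Option Int) (r0 : Nat), r0 < p → chIt g x r0 = chIt g y r0 →
    (∀ r < r0, chIt g x r ≠ chIt g y r) → pvMeet g p x y = chIt g x r0 := by
  induction p with
  | zero => intro x y r0 hr0; omega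
  | succ p ih =>
    intro x y r0 hr0 heq hmin
    cases r0 with
    | zero =>
      rw [chIt_zero] at heq ⊢
      rw [pvMeet, if_pos (by simpa [chIt_zero] using heq)]
    | succ r0' =>
      have h0 : x ≠ y := by
        have := hmin 0 (by omega)
        simpa [chIt_zero] using this
      rw [pvMeet, if_neg h0, chIt_succ]
      exact ih (pvGet g x) (pvGet g y) r0' (by omega)
        (by rw [← chIt_succ, ← chIt_succ]; exact heq)
        (fun r hr => by
          rw [← chIt_succ, ← chIt_succ]
          exact hmin (r + 1) (by omega))

-- ===== VERDICT (by name: the statement is the Claim_ definition above) =====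
theorem find_intersection_id_spec : Claim_equal_find_intersection_id := by
  intro id1 id2 graph _ hPre
  unfold Spec_find_intersection_id
  obtain ⟨h1, h2⟩ := hPre
  obtain ⟨m1, hm1, hS1⟩ := stops_exists graph (graph.length + 1) id1 h1
  obtain ⟨m2, hm2, hS2⟩ := stops_exists graph (graph.length + 1) id2 h2
  have hn1 : pvChainLen graph (graph.length + 1) id1 = m1 := chainLen_eq _ _ _ _ hS1 hm1
  have hn2 : pvChainLen graph (graph.length + 1) id2 = m2 := chainLen_eq _ _ _ _ hS2 hm2
  unfold find_intersection_id find_intersection_id_alt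
  simp only [hn1, hn2, advance_eq]
  classical
  have hvis : ∀ n : Int, n ∈ fiLoop1 graph (graph.length + 1) id1 PySem.Set.empty ↔
      ∃ j, j < m1 ∧ chIt graph id1 j = some n := by
    intro n
    rw [loop1_mem graph _ id1 m1 hS1 hm1]
    simp [PySem.Set.empty]
  by_cases hc : ∃ i, i < m2 ∧ ∃ j, j < m1 ∧ chIt graph id2 i = chIt graph id1 j
  · obtain ⟨hi0m, j0, hj0m, heq⟩ := Nat.find_spec hc
    set i0 := Nat.find hc with hi0def
    obtain ⟨n0, hn0, hn0ne⟩ := truthy_some _ (hS2.1 i0 hi0m)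
    have hA : fiLoop2 graph (graph.length + 1) id2
        (fiLoop1 graph (graph.length + 1) id1 PySem.Set.empty) = some n0 := by
      apply loop2_found graph _ id2 m2 i0 _ n0 hS2 hm2 hi0m hn0
      · exact (hvis n0).mpr ⟨j0, hj0m, by rw [← heq]; exact hn0⟩
      · intro i hi n hchn hmem
        obtain ⟨j, hj, hcj⟩ := (hvis n).mp hmem
        exact Nat.find_min hc hi ⟨by omega, j, hj, by rw [hchn, hcj]⟩
    rw [hA]
    have hshift : ∀ r, chIt graph id2 (r + i0) = chIt graph id1 (r + j0) := by
      intro r; rw [chIt_add, chIt_add, heq]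
    have hfals1 : pvTruthy (chIt graph id2 ((m1 - j0) + i0)) = false := by
      rw [hshift]
      have he : (m1 - j0) + j0 = m1 := by omega
      rw [he]; exact hS1.2
    have hle2 : m2 ≤ (m1 - j0) + i0 := by
      by_contra hlt
      rw [Nat.not_le] at hlt
      rw [hS2.1 _ hlt] at hfals1
      simp at hfals1
    have hfals2 : pvTruthy (chIt graph id1 ((m2 - i0) + j0)) = false := by
      rw [← hshift]
      have he : (m2 - i0) + i0 = m2 := by omega
      rw [he]; exact hS2.2
    have hle1 : m1 ≤ (m2 - i0) + j0 := by
      by_contra hlt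
      rw [Nat.not_le] at hlt
      rw [hS1.1 _ hlt] at hfals2
      simp at hfals2
    set p := min m1 m2 with hp
    set r0 := p - (m1 - j0) with hr0
    have hidx : r0 + (m1 - m2) = j0 ∧ r0 + (m2 - m1) = i0 ∧ r0 < p := by omega
    have hB : pvMeet graph p (chIt graph id1 (m1 - m2)) (chIt graph id2 (m2 - m1)) = some n0 := by
      have hmf := meet_found graph p (chIt graph id1 (m1 - m2)) (chIt graph id2 (m2 - m1)) r0
        hidx.2.2 ?_ ?_
      · rw [hmf, ← chIt_add, hidx.1, ← heq]; exact hn0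
      · rw [← chIt_add, ← chIt_add, hidx.1, hidx.2.1, heq]
      · intro r hr hre
        rw [← chIt_add, ← chIt_add] at hre
        exact Nat.find_min hc (show r + (m2 - m1) < i0 by omega)
          ⟨by omega, r + (m1 - m2), by omega, hre.symm⟩
    exact hB.symm
  · have hA : fiLoop2 graph (graph.length + 1) id2
        (fiLoop1 graph (graph.length + 1) id1 PySem.Set.empty) = none := by
      apply loop2_none graph _ id2 m2 _ hS2 hm2
      intro i hi n hchn hmem
      obtain ⟨j, hj, hcj⟩ := (hvis n).mp hmem
      exact hc ⟨i, hi, j, hj, by rw [hchn, hcj]⟩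
    have hB : pvMeet graph (min m1 m2) (chIt graph id1 (m1 - m2)) (chIt graph id2 (m2 - m1)) = none := by
      apply meet_none
      intro r hr hre
      rw [← chIt_add, ← chIt_add] at hre
      exact hc ⟨r + (m2 - m1), by omega, r + (m1 - m2), by omega, hre.symm⟩
    rw [hA, hB]
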